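-- pv_equiv track=rewrite | github.com/Bafomet666/OSINT-SAN | .venv/lib/python3.11/site-packages/stem/util/connection.py | get_mask_ipv4
-- ===== SOURCE A (Python) =====
-- FULL_IPv4_MASK = '255.255.255.255'
--
-- def get_mask_ipv4(bits):
--   """
--   Provides the IPv4 mask for a given number of bits, in the dotted-quad format.
--
--   :param int bits: number of bits to be converted
--
--   :returns: **str** with the subnet mask representation for this many bits
--
--   :raises: **ValueError** if given a number of bits outside the range of 0-32
--   """
--
--   if bits > 32 or bits < 0:
--     raise ValueError('A mask can only be 0-32 bits, got %i' % bits)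
--   elif bits == 32:
--     return FULL_IPv4_MASK
--
--   # get the binary representation of the mask
--   mask_bin = _get_binary(2 ** bits - 1, 32)[::-1]
--
--   # breaks it into eight character groupings
--   octets = [mask_bin[8 * i:8 * (i + 1)] for i in range(4)]
--
--   # converts each octet into its integer value
--   return '.'.join([str(int(octet, 2)) for octet in octets])
--
-- def _get_binary(value, bits):
--   """
--   Provides the given value as a binary string, padded with zeros to the given
--   number of bits.
--
--   :param int value: value to be converted
--   :param int bits: number of bits to pad to
--   """
--
--   # http://www.daniweb.com/code/snippet216539.html
--   return ''.join([str((value >> y) & 1) for y in range(bits - 1, -1, -1)])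
-- ===== SOURCE B (Python) =====
-- FULL_IPv4_MASK = '255.255.255.255'
--
-- def get_mask_ipv4(bits):
--   if bits > 32 or bits < 0:
--     raise ValueError('A mask can only be 0-32 bits, got %i' % bits)
--
--   full = (0xFFFFFFFF << (32 - bits)) & 0xFFFFFFFF
--   return '.'.join(str((full >> shift) & 0xFF) for shift in (24, 16, 8, 0))
-- ===== Notes on version B (the rewrite author's own statement) =====
-- stated objective: idiomatic
-- what changed: Replaces the binary-string construction, reversal, slicing into octet substrings and int(...,2) re-parsing with closed-form bit arithmetic: the 32-bit mask is computed as one shifted integer and the four octets extracted with shifts and masks.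
import Mathlib
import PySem

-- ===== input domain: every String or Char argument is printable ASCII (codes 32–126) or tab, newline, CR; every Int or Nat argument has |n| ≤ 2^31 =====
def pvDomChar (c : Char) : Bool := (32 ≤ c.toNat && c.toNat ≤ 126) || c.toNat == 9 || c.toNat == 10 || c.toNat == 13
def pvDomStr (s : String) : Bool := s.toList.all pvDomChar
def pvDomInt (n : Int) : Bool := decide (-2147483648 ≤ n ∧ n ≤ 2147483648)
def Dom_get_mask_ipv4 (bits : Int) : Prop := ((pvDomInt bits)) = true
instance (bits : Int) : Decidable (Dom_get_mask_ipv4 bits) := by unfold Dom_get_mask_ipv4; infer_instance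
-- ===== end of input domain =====

-- B computes the mask by closed-form bit arithmetic (one shifted 32-bit integer, octets by
-- shifts/masks) instead of A's binary-string building, reversal, slicing and int(...,2) re-parsing.

-- ===== PORT A =====
-- str((value >> y) & 1); inside Pre_ value = 2^bits - 1 ≥ 0, modelled on Nat (exact there)
def pvGetBinary (value : Nat) (bits : Int) : String :=
  PySem.Str.join "" ((PySem.List.pyRange (bits - 1) (-1) (-1)).map
    (fun y => PySem.Int.toStr (Int.ofNat ((value >>> y.toNat) &&& 1))))

-- int(octet, 2) for a string of '0'/'1' characters (exact on that domain)
def pvIntBase2 (s : String) : Int :=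
  Int.ofNat (s.toList.foldl (fun acc c => 2 * acc + (if c = '1' then 1 else 0)) 0)

def get_mask_ipv4 (bits : Int) : String :=
  if bits > 32 ∨ bits < 0 then ""  -- ValueError: excluded by Pre_
  else if bits = 32 then "255.255.255.255"
  else
    let mask_bin := (PySem.Str.slice? (pvGetBinary (2 ^ bits.toNat - 1) 32) none none (-1)).getD ""
    let octets := (PySem.List.pyRange 0 4 1).map (fun i => PySem.Str.slice mask_bin (some (8 * i)) (some (8 * (i + 1))))
    PySem.Str.join "." (octets.map (fun octet => PySem.Int.toStr (pvIntBase2 octet)))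

-- ===== PORT B =====
def get_mask_ipv4_alt (bits : Int) : String :=
  if bits > 32 ∨ bits < 0 then ""  -- ValueError: excluded by Pre_
  else
    let full := (0xFFFFFFFF <<< (32 - bits).toNat) &&& 0xFFFFFFFF
    PySem.Str.join "." ([24, 16, 8, 0].map (fun shift => PySem.Int.toStr (Int.ofNat ((full >>> shift) &&& 0xFF))))

-- ===== PRECONDITION & SPEC =====
-- A raises ValueError for bits outside 0-32 (as does B); those inputs are excluded.
def Pre_get_mask_ipv4 (bits : Int) : Prop := 0 ≤ bits ∧ bits ≤ 32
instance (bits : Int) : Decidable (Pre_get_mask_ipv4 bits) := by unfold Pre_get_mask_ipv4; infer_instance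
def pvWitness_get_mask_ipv4 : Int := (19)

def Spec_get_mask_ipv4 (bits : Int) (out : String) : Prop := out = get_mask_ipv4_alt bits
instance (bits : Int) (out : String) : Decidable (Spec_get_mask_ipv4 bits out) := by unfold Spec_get_mask_ipv4; infer_instance

-- ===== CLAIM (what is proved, stated in full; the proofs are below) =====
def Claim_equal_get_mask_ipv4 : Prop := ∀ (bits : Int), Dom_get_mask_ipv4 bits → Pre_get_mask_ipv4 bits → Spec_get_mask_ipv4 bits (get_mask_ipv4 bits)

-- ===== LEMMAS AND PROOFS =====

-- ===== VERDICT (by name: the statement is the Claim_ definition above) =====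
theorem get_mask_ipv4_spec : Claim_equal_get_mask_ipv4 := by
  intro bits _ hpre
  unfold Spec_get_mask_ipv4
  obtain ⟨h0, h32⟩ := hpre
  interval_cases bits <;> decide
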